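-- pv_equiv track=rewrite | github.com/Mugamta/Boostcamp_AITech5_CV11 | 2024/05.04/박수영_BOJ_1244_스위치_켜고_끄기.py | solution
-- ===== SOURCE A (Python) =====
-- def solution(n, switches, m, students):
--     """
--     goal:
--         - 스위치들의 마지막 상태 출력
--         - 1번 스위치에서 시작하여 마지막 스위치까지 '한 줄에 20개씩' 출력
--         - 켜진 스위치는 1, 꺼진 스위치는 0으로 표시하고, 스위치 상태 사이에 빈칸을 하나씩 두기
--     note:
--         - 학생들은 각각 '1 이상이고 스위치 개수 이하인 자연수'를 보유
--         - 자신의 '성별과 받은 수에 따라' 스위치를 조작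
--         - 남학생: '스위치 번호가 자기가 받은 수의 배수이면' 스위치의 상태를 바꿈
--         - 여학생:
--             '자기가 받은 수와 같은 번호가 붙은 스위치를 중심'으로,
--             '좌우가 대칭이면서 가장 많은 스위치를 포함하는 구간'을 찾아서,
--             '그 구간에 속한 스위치의 상태를 모두 바꿈'
--     how:
--         - 구현
--     """
--     def change_status(e):
--         return '1' if e == '0' else '0'
--
--     for gender, number in students:
--         # 남학생 >> 본인이 받은 수의 배수에 해당되는 스위치들의 상태를 변경
--         if gender == 1:
--             for idx in range(number, n + 1, number):
--                 switches[idx - 1] = change_status(switches[idx - 1])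
--
--         # 여학생
--         elif gender == 2:
--             # 중심 스위치의 상태를 먼저 변경
--             center = number - 1
--             switches[center] = change_status(switches[center])
--
--             # 좌우 대칭을 확인하면서, 해당되는 스위치들의 상태를 변경
--             left, right = center - 1, center + 1
--             while left >= 0 and right < n:
--                 if switches[left] == switches[right]:
--                     switches[left] = change_status(switches[left])
--                     switches[right] = switches[left]
--
--                 else:
--                     break
--
--                 left -= 1
--                 right += 1
--
--     return switches
-- ===== SOURCE B (Python) =====
-- def solution(n, switches, m, students):
--     # Note: like A, mutates `switches` in place (via slice assignment) and returns it.
--     def flip(e):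
--         return '1' if e == '0' else '0'
--
--     for gender, number in students:
--         if gender == 1:
--             # toggle exactly the positions whose 1-based number is a multiple of `number`
--             switches[:] = [flip(e) if i < n and (i + 1) % number == 0 else e
--                            for i, e in enumerate(switches)]
--         elif gender == 2:
--             # first find the maximal symmetric radius from the untouched array,
--             # then toggle the whole interval [c - r, c + r] in one pass
--             c = number - 1
--             r = 0
--             while c - r - 1 >= 0 and c + r + 1 < n and switches[c - r - 1] == switches[c + r + 1]:
--                 r += 1
--             switches[:] = [flip(e) if c - r <= i <= c + r else e
--                            for i, e in enumerate(switches)]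
--     return switches
-- ===== Notes on version B (the rewrite author's own statement) =====
-- stated objective: alternative
-- what changed: The in-place index-by-index mutation (stride loop for males, pair-toggling while loop for females) is replaced by a rebuild of the whole list per student from a predicate: males toggle positions by a divisibility test, females first scan the untouched array for the maximal symmetric radius r and then toggle the interval [center-r, center+r] in one pass.
-- outside the precondition, e.g. on solution(3, ['0', '1', '0'], 1, [(2, 0)]): A returns ['0', '1', '1'], B returns ['0', '1', '0']; on solution(1, ['0'], 1, [(1, -1)]): A returns ['0'], B returns ['1']; on solution(3, ['0', '1'], 1, [(2, 1)]): A returns ['1', '1'], B returns ['1', '1']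
import Mathlib
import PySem

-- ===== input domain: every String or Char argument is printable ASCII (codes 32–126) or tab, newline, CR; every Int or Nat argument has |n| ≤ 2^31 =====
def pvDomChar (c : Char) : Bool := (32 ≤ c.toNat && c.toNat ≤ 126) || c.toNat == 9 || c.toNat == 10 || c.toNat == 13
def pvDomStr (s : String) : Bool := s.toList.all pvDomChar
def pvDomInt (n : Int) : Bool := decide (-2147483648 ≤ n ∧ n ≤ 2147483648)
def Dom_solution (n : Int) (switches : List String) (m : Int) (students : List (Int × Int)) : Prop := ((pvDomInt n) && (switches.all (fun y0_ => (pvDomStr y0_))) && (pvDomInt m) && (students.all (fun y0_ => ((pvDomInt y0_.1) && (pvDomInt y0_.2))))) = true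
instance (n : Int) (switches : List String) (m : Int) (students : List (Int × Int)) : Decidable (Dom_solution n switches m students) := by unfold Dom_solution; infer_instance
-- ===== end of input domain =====

-- B rebuilds the list per student from a predicate (divisibility test for males; a
-- radius scan of the untouched array then an interval toggle for females) instead of
-- A's in-place stride loop and pair-toggling while loop; same cost, different structure.
-- Both A and B mutate `switches` in place; the equivalence proved here is about the
-- returned value (which is that mutated list in both).

-- ===== PORT A =====
def pvFlip (e : String) : String := if e = "0" then "1" else "0"

-- A's female while loop: toggle symmetric pairs moving outward while they match
def pvFemLoop (n : Int) (sw : List String) (left right : Int) : List String :=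
  if h : 0 ≤ left ∧ right < n then
    if PySem.List.pyGetD sw left "" = PySem.List.pyGetD sw right "" then
      let v := pvFlip (PySem.List.pyGetD sw left "")
      pvFemLoop n (PySem.List.pySetD (PySem.List.pySetD sw left v) right v) (left - 1) (right + 1)
    else sw
  else sw
termination_by (n - right).toNat
decreasing_by omega

def solution (n : Int) (switches : List String) (m : Int) (students : List (Int × Int)) : List String :=
  students.foldl (fun sw p =>
    if p.1 = 1 then
      (PySem.List.pyRange p.2 (n + 1) p.2).foldl
        (fun sw idx => PySem.List.pySetD sw (idx - 1) (pvFlip (PySem.List.pyGetD sw (idx - 1) ""))) sw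
    else if p.1 = 2 then
      let center := p.2 - 1
      let sw1 := PySem.List.pySetD sw center (pvFlip (PySem.List.pyGetD sw center ""))
      pvFemLoop n sw1 (center - 1) (center + 1)
    else sw) switches

-- ===== PORT B =====
-- B's radius scan over the untouched array
def pvRadius (n : Int) (sw : List String) (c r : Int) : Int :=
  if h : 0 ≤ c - r - 1 ∧ c + r + 1 < n ∧
      PySem.List.pyGetD sw (c - r - 1) "" = PySem.List.pyGetD sw (c + r + 1) "" then
    pvRadius n sw c (r + 1)
  else r
termination_by (n - (c + r)).toNat
decreasing_by omega

def solution_alt (n : Int) (switches : List String) (m : Int) (students : List (Int × Int)) : List String :=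
  students.foldl (fun sw p =>
    if p.1 = 1 then
      sw.mapIdx (fun i e =>
        if (i : Int) < n ∧ PySem.Int.mod ((i : Int) + 1) p.2 = 0 then pvFlip e else e)
    else if p.1 = 2 then
      let c := p.2 - 1
      let r := pvRadius n sw c 0
      sw.mapIdx (fun i e => if c - r ≤ (i : Int) ∧ (i : Int) ≤ c + r then pvFlip e else e)
    else sw) switches

-- ===== PRECONDITION & SPEC =====
-- Pre_ restricts to the problem's natural domain: every student's number is a positive
-- valid switch number (for a male, all multiples up to n — the largest is n - n % number —
-- must be existing switch indices; for a female, 1 ≤ number ≤ n ≤ number of switches);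
-- outside it A raises IndexError/ValueError, silently wraps negative indices (an artefact),
-- or no-ops on an empty range — see claim.json "cites".
def Pre_solution (n : Int) (switches : List String) (m : Int) (students : List (Int × Int)) : Prop :=
  ∀ p ∈ students,
    (p.1 = 1 → 1 ≤ p.2 ∧ (p.2 ≤ n → n - PySem.Int.mod n p.2 ≤ (switches.length : Int))) ∧
    (p.1 = 2 → 1 ≤ p.2 ∧ p.2 ≤ n ∧ n ≤ (switches.length : Int))
instance (n : Int) (switches : List String) (m : Int) (students : List (Int × Int)) : Decidable (Pre_solution n switches m students) := by unfold Pre_solution; infer_instance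

def pvWitness_solution : Int × List String × Int × (List (Int × Int)) :=
  (3, ["0", "1", "0"], 2, [(1, 2), (2, 2)])

def Spec_solution (n : Int) (switches : List String) (m : Int) (students : List (Int × Int)) (out : List String) : Prop := out = solution_alt n switches m students
instance (n : Int) (switches : List String) (m : Int) (students : List (Int × Int)) (out : List String) : Decidable (Spec_solution n switches m students out) := by unfold Spec_solution; infer_instance

-- ===== CLAIM (what is proved, stated in full; the proofs are below) =====
def Claim_equal_solution : Prop := ∀ (n : Int) (switches : List String) (m : Int) (students : List (Int × Int)), Dom_solution n switches m students → Pre_solution n switches m students → Spec_solution n switches m students (solution n switches m students)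

-- ===== LEMMAS AND PROOFS =====

-- interval toggle, the shape of B's female result (and of intermediate states of A's loop)
def pvTog (sw : List String) (lo hi : Int) : List String :=
  sw.mapIdx (fun i e => if lo ≤ (i : Int) ∧ (i : Int) ≤ hi then pvFlip e else e)

theorem length_pvTog (sw : List String) (lo hi : Int) : (pvTog sw lo hi).length = sw.length := by
  simp [pvTog]

theorem getElem_pvTog (sw : List String) (lo hi : Int) (i : Nat) (h : i < (pvTog sw lo hi).length) :
    (pvTog sw lo hi)[i] = if lo ≤ (i : Int) ∧ (i : Int) ≤ hi then pvFlip (sw[i]'(by simpa [length_pvTog] using h)) else sw[i]'(by simpa [length_pvTog] using h) := by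
  simp [pvTog]

theorem pyGetD_pvTog (sw : List String) (lo hi i : Int) (h0 : 0 ≤ i) (h1 : i < (sw.length : Int)) :
    PySem.List.pyGetD (pvTog sw lo hi) i "" =
      if lo ≤ i ∧ i ≤ hi then pvFlip (PySem.List.pyGetD sw i "") else PySem.List.pyGetD sw i "" := by
  have h1' : i < ((pvTog sw lo hi).length : Int) := by rw [length_pvTog]; exact h1
  rw [PySem.List.pyGetD_eq_getElem _ _ h0 h1', PySem.List.pyGetD_eq_getElem _ _ h0 h1,
    getElem_pvTog]
  rw [Int.toNat_of_nonneg h0]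

-- A's male fold over a nodup list of valid 1-based indices = toggle-by-membership
theorem male_fold (L : List Int) (sw : List String) (hnd : L.Nodup)
    (hb : ∀ idx ∈ L, 1 ≤ idx ∧ idx ≤ (sw.length : Int)) :
    L.foldl (fun sw idx => PySem.List.pySetD sw (idx - 1) (pvFlip (PySem.List.pyGetD sw (idx - 1) ""))) sw
      = sw.mapIdx (fun i e => if ((i : Int) + 1) ∈ L then pvFlip e else e) := by
  induction L generalizing sw with
  | nil =>
    apply List.ext_getElem
    · simp
    · intro i h₁ h₂; simp
  | cons a t ih =>
    obtain ⟨ha1, ha2⟩ := hb a (List.mem_cons_self)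
    have h0 : (0:Int) ≤ a - 1 := by omega
    rw [List.foldl_cons, PySem.List.pySetD_of_nonneg _ _ h0,
        PySem.List.pyGetD_eq_getElem _ _ h0 (by omega)]
    rw [ih _ hnd.of_cons (by
      intro idx hidx
      have := hb idx (List.mem_cons_of_mem _ hidx)
      simpa using this)]
    apply List.ext_getElem
    · simp
    · intro i h₁ h₂
      simp only [List.getElem_mapIdx, List.getElem_set, List.mem_cons]
      have hiff : ((i:Int) + 1 = a) ↔ ((a-1).toNat = i) := by omega
      by_cases hc : (a-1).toNat = i
      · have hA : (i:Int)+1 = a := hiff.mpr hc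
        have hnt : ((i:Int)+1) ∉ t := by rw [hA]; exact (List.nodup_cons.mp hnd).1
        have hat : a ∉ t := (List.nodup_cons.mp hnd).1
        simp [hc, hA, hat]
      · have hA : ¬((i:Int)+1 = a) := fun h => hc (hiff.mp h)
        have hc' : ¬(a.toNat - 1 = i) := by omega
        simp [hA, hc']

-- A's female loop from radius j equals the interval toggle up to the scanned radius
theorem fem_loop_eq (n : Int) (sw : List String) (c : Int) (hc0 : 0 ≤ c) (hcn : c < n)
    (hlen : n ≤ (sw.length : Int)) :
    ∀ (k : Nat) (j : Int), 0 ≤ j → (n - (c + j)).toNat ≤ k →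
      pvFemLoop n (pvTog sw (c - j) (c + j)) (c - j - 1) (c + j + 1)
        = pvTog sw (c - pvRadius n sw c j) (c + pvRadius n sw c j) := by
  intro k
  induction k with
  | zero =>
    intro j hj hk
    rw [pvFemLoop, pvRadius, dif_neg (by omega : ¬(0 ≤ c - j - 1 ∧ c + j + 1 < n)),
      dif_neg (by
        intro h
        exact absurd h.2.1 (by omega))]
  | succ k ih =>
    intro j hj hk
    by_cases hbnd : 0 ≤ c - j - 1 ∧ c + j + 1 < n
    · have hL0 : (0:Int) ≤ c - j - 1 := hbnd.1
      have hRn : c + j + 1 < n := hbnd.2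
      have hLlen : c - j - 1 < (sw.length : Int) := by omega
      have hRlen : c + j + 1 < (sw.length : Int) := by omega
      have hTL : PySem.List.pyGetD (pvTog sw (c-j) (c+j)) (c-j-1) ""
          = PySem.List.pyGetD sw (c-j-1) "" := by
        rw [pyGetD_pvTog sw _ _ _ hL0 hLlen, if_neg (by omega)]
      have hTR : PySem.List.pyGetD (pvTog sw (c-j) (c+j)) (c+j+1) ""
          = PySem.List.pyGetD sw (c+j+1) "" := by
        rw [pyGetD_pvTog sw _ _ _ (by omega) hRlen, if_neg (by omega)]
      by_cases hv : PySem.List.pyGetD sw (c-j-1) "" = PySem.List.pyGetD sw (c+j+1) ""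
      · have hT2 : PySem.List.pySetD
            (PySem.List.pySetD (pvTog sw (c-j) (c+j)) (c-j-1)
              (pvFlip (PySem.List.pyGetD (pvTog sw (c-j) (c+j)) (c-j-1) "")))
            (c+j+1) (pvFlip (PySem.List.pyGetD (pvTog sw (c-j) (c+j)) (c-j-1) ""))
            = pvTog sw (c-(j+1)) (c+(j+1)) := by
          rw [hTL, PySem.List.pySetD_of_nonneg _ _ hL0,
            PySem.List.pySetD_of_nonneg _ _ (by omega : (0:Int) ≤ c+j+1),
            PySem.List.pyGetD_eq_getElem _ _ hL0 hLlen]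
          apply List.ext_getElem
          · simp [length_pvTog]
          · intro i h₁ h₂
            simp only [List.getElem_set, getElem_pvTog]
            by_cases e1 : (c+j+1).toNat = i
            · subst e1
              rw [if_pos rfl, if_pos (by omega)]
              have h' := hv
              rw [PySem.List.pyGetD_eq_getElem _ _ hL0 hLlen,
                PySem.List.pyGetD_eq_getElem _ _ (by omega : (0:Int) ≤ c+j+1) hRlen] at h'
              rw [h']
            · by_cases e2 : (c-j-1).toNat = i
              · subst e2
                rw [if_neg e1, if_pos rfl, if_pos (by omega)]
              · rw [if_neg e1, if_neg e2]
                by_cases hin : c - j ≤ (i:Int) ∧ (i:Int) ≤ c + j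
                · rw [if_pos hin, if_pos (by omega)]
                · rw [if_neg hin, if_neg (by omega)]
        rw [pvFemLoop, dif_pos hbnd, if_pos (by rw [hTL, hTR]; exact hv)]
        simp only [hT2]
        rw [pvRadius, dif_pos (⟨hL0, hRn, hv⟩ : 0 ≤ c - j - 1 ∧ c + j + 1 < n ∧
          PySem.List.pyGetD sw (c - j - 1) "" = PySem.List.pyGetD sw (c + j + 1) "")]
        have e1' : c - j - 1 - 1 = c - (j+1) - 1 := by ring
        have e2' : c + j + 1 + 1 = c + (j+1) + 1 := by ring
        rw [e1', e2']
        exact ih (j+1) (by omega) (by omega)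
      · rw [pvFemLoop, dif_pos hbnd, if_neg (by rw [hTL, hTR]; exact hv), pvRadius,
          dif_neg (by intro h; exact hv h.2.2)]
    · rw [pvFemLoop, dif_neg (fun h => hbnd ⟨h.1, h.2⟩), pvRadius,
        dif_neg (fun h => hbnd ⟨h.1, h.2.1⟩)]

-- A's male stride-fold equals B's divisibility-predicate rebuild
theorem male_case (n number : Int) (sw : List String) (h1 : 1 ≤ number)
    (hmul : number ≤ n → n - PySem.Int.mod n number ≤ (sw.length : Int)) :
    (PySem.List.pyRange number (n + 1) number).foldl
      (fun sw idx => PySem.List.pySetD sw (idx - 1) (pvFlip (PySem.List.pyGetD sw (idx - 1) ""))) sw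
    = sw.mapIdx (fun i e =>
        if (i : Int) < n ∧ PySem.Int.mod ((i : Int) + 1) number = 0 then pvFlip e else e) := by
  have hs : (0:Int) < number := by omega
  have hdvd : ∀ x : Int, number ∣ (x - number) ↔ number ∣ x := by
    intro x
    constructor
    · intro h
      have := dvd_add h (dvd_refl number)
      simpa using this
    · intro h
      exact dvd_sub h (dvd_refl number)
  have hnd : (PySem.List.pyRange number (n + 1) number).Nodup := by
    rw [PySem.List.pyRange_of_pos _ _ hs]
    refine List.Nodup.map ?_ List.nodup_range
    intro a b hab
    have h' : number * (a : Int) = number * (b : Int) := by linarith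
    have := mul_left_cancel₀ (by omega : number ≠ 0) h'
    exact_mod_cast this
  rw [male_fold _ _ hnd (by
    intro idx hidx
    rw [PySem.List.mem_pyRange_iff_of_pos hs] at hidx
    obtain ⟨hge, hlt, hdv⟩ := hidx
    refine ⟨by omega, ?_⟩
    have hml := hmul (by omega)
    rw [PySem.Int.mod_eq_emod_of_pos hs] at hml
    obtain ⟨k, hk⟩ := (hdvd idx).mp hdv
    have hk1 : k ≤ n / number := by
      rw [Int.le_ediv_iff_mul_le hs, mul_comm]
      linarith
    have hk2 : number * k ≤ number * (n / number) :=
      mul_le_mul_of_nonneg_left hk1 (by omega)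
    have hemod : n % number = n - number * (n / number) := Int.emod_def n number
    linarith)]
  apply List.ext_getElem
  · simp
  · intro i h₁ h₂
    simp only [List.getElem_mapIdx]
    have hmem : ((i : Int) + 1) ∈ PySem.List.pyRange number (n + 1) number ↔
        ((i : Int) < n ∧ PySem.Int.mod ((i : Int) + 1) number = 0) := by
      rw [PySem.List.mem_pyRange_iff_of_pos hs]
      constructor
      · rintro ⟨ha, hb, hc⟩
        refine ⟨by omega, ?_⟩
        rw [PySem.Int.mod_eq_zero_iff_dvd]
        exact (hdvd _).mp hc
      · rintro ⟨ha, hb⟩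
        rw [PySem.Int.mod_eq_zero_iff_dvd] at hb
        refine ⟨Int.le_of_dvd (by omega) hb, by omega, (hdvd _).mpr hb⟩
    by_cases hm : ((i : Int) + 1) ∈ PySem.List.pyRange number (n + 1) number
    · rw [if_pos hm, if_pos (hmem.mp hm)]
    · rw [if_neg hm, if_neg (fun hcond => hm (hmem.mpr hcond))]

-- toggling just the center is the one-element interval toggle
theorem center_tog (sw : List String) (c : Int) (h0 : 0 ≤ c) (h1 : c < (sw.length : Int)) :
    PySem.List.pySetD sw c (pvFlip (PySem.List.pyGetD sw c "")) = pvTog sw c c := by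
  rw [PySem.List.pySetD_of_nonneg _ _ h0, PySem.List.pyGetD_eq_getElem _ _ h0 h1]
  apply List.ext_getElem
  · simp [length_pvTog]
  · intro i hh₁ hh₂
    simp only [List.getElem_set, getElem_pvTog]
    by_cases e : c.toNat = i
    · subst e
      rw [if_pos rfl, if_pos (by omega)]
    · rw [if_neg e, if_neg (by omega)]

-- A's female branch equals B's radius-scan-then-interval-toggle
theorem fem_case (n number : Int) (sw : List String) (h1 : 1 ≤ number) (h2 : number ≤ n)
    (hlen : n ≤ (sw.length : Int)) :
    pvFemLoop n
      (PySem.List.pySetD sw (number - 1) (pvFlip (PySem.List.pyGetD sw (number - 1) "")))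
      (number - 1 - 1) (number - 1 + 1)
    = pvTog sw ((number - 1) - pvRadius n sw (number - 1) 0)
        ((number - 1) + pvRadius n sw (number - 1) 0) := by
  rw [center_tog sw (number - 1) (by omega) (by omega)]
  have h := fem_loop_eq n sw (number - 1) (by omega) (by omega) hlen
    ((n - (number - 1)).toNat) 0 le_rfl (by omega)
  simpa using h

theorem sol_eq (n m : Int) : ∀ (students : List (Int × Int)) (sw : List String),
    (∀ p ∈ students,
      (p.1 = 1 → 1 ≤ p.2 ∧ (p.2 ≤ n → n - PySem.Int.mod n p.2 ≤ (sw.length : Int))) ∧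
      (p.1 = 2 → 1 ≤ p.2 ∧ p.2 ≤ n ∧ n ≤ (sw.length : Int))) →
    solution n sw m students = solution_alt n sw m students := by
  intro students
  induction students with
  | nil => intro sw _; rfl
  | cons p t ih =>
    intro sw hst
    obtain ⟨hp1, hp2⟩ := hst p List.mem_cons_self
    have hts := fun q hq => hst q (List.mem_cons_of_mem p hq)
    simp only [solution, solution_alt, List.foldl_cons]
    by_cases g1 : p.1 = 1
    · rw [if_pos g1, if_pos g1, male_case n p.2 sw (hp1 g1).1 (hp1 g1).2]
      refine ih (sw.mapIdx _) ?_
      intro q hq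
      have := hts q hq
      simpa using this
    · by_cases g2 : p.1 = 2
      · rw [if_neg g1, if_neg g1, if_pos g2, if_pos g2,
          fem_case n p.2 sw (hp2 g2).1 (hp2 g2).2.1 (hp2 g2).2.2]
        refine ih _ ?_
        intro q hq
        have := hts q hq
        simpa [length_pvTog] using this
      · rw [if_neg g1, if_neg g1, if_neg g2, if_neg g2]
        exact ih sw hts

-- ===== VERDICT (by name: the statement is the Claim_ definition above) =====
theorem solution_spec : Claim_equal_solution := by
  intro n switches m students _ hpre
  unfold Spec_solution
  exact sol_eq n m students switches hpre
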